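-- pv_equiv track=rewrite | github.com/Tuttlelab/Descriptors | sfi_analysis.py | time_resolved_sheet_analysis
-- ===== SOURCE A (Python) =====
-- from collections import defaultdict
--
-- def time_resolved_sheet_analysis(sheet_records, min_sheet_size):
--     """
--     Analyze the dynamics of sheet formation over time, tracking the start, end, and lifetime of each sheet.
--
--     Parameters:
--     - sheet_records (dict): A dictionary where keys are frame numbers and values are dictionaries
--       of sheet IDs mapped to peptide indices for each frame.
--     - min_sheet_size (int): The minimum number of frames a sheet must persist to be considered.
--
--     Returns:
--     - sheet_lifetimes (dict): A dictionary with sheet IDs as keys and dictionaries as values.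
--       Each dictionary contains the start frame, end frame, and lifetime (in frames) for each sheet.
--     """
--     # Initialize tracking of each sheet's frames and peptides
--     sheet_tracks = defaultdict(list)
--     for frame_number, sheets in sheet_records.items():
--         for sheet_id, peptides in sheets.items():
--             sheet_tracks[sheet_id].append((frame_number, peptides))
--
--     # Analyze each sheet's lifetime and properties
--     sheet_lifetimes = {}
--     for sheet_id, history in sheet_tracks.items():
--         if len(history) >= min_sheet_size:
--             # Sort frames to get continuous tracking of each sheet
--             frames = [entry[0] for entry in history]
--             start_frame = min(frames)
--             end_frame = max(frames)
--             lifetime = end_frame - start_frame + 1  # Inclusive of start and end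
--
--             # Save results for sheets meeting the minimum persistence criterion
--             sheet_lifetimes[sheet_id] = {
--                 "start_frame": start_frame,
--                 "end_frame": end_frame,
--                 "lifetime": lifetime
--             }
--
--     return sheet_lifetimes
-- ===== SOURCE B (Python) =====
-- def time_resolved_sheet_analysis(sheet_records, min_sheet_size):
--     # One pass: per sheet keep only a running (count, min frame, max frame) aggregate; no history lists.
--     aggs = {}
--     for frame_number, sheets in sheet_records.items():
--         for sheet_id in sheets:
--             if sheet_id in aggs:
--                 count, lo, hi = aggs[sheet_id]
--                 aggs[sheet_id] = (count + 1,
--                                   frame_number if frame_number < lo else lo,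
--                                   frame_number if frame_number > hi else hi)
--             else:
--                 aggs[sheet_id] = (1, frame_number, frame_number)
--     return {
--         sheet_id: {"start_frame": lo, "end_frame": hi, "lifetime": hi - lo + 1}
--         for sheet_id, (count, lo, hi) in aggs.items()
--         if count >= min_sheet_size
--     }
-- ===== Notes on version B (the rewrite author's own statement) =====
-- stated objective: alternative
-- what changed: Single pass maintaining per-sheet running (count, min-frame, max-frame) aggregates instead of accumulating full per-sheet history lists and re-scanning them with min()/max(); output emitted by one filtered comprehension over the aggregates.
import Mathlib
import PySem

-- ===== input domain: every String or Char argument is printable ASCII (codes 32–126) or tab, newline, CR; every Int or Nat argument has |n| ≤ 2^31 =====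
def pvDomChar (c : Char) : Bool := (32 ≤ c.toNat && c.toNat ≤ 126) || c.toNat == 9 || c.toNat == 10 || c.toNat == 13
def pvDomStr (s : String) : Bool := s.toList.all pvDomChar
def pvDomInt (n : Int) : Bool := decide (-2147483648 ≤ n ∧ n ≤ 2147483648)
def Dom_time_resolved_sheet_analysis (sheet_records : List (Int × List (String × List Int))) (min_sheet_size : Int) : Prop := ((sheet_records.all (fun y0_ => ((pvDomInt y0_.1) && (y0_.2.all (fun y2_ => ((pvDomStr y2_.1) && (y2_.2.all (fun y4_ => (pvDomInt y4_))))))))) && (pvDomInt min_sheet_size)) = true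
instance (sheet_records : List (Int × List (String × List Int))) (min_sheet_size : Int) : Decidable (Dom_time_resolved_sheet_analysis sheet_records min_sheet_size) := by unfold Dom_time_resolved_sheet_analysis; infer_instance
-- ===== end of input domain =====

-- B replaces A's per-sheet history lists (re-scanned with min()/max()) by a single pass keeping
-- only a running (count, min-frame, max-frame) aggregate per sheet; same output, no history kept.

-- ===== PORT A =====
def time_resolved_sheet_analysis (sheet_records : List (Int × List (String × List Int))) (min_sheet_size : Int) : List (String × List (String × Int)) :=
  -- sheet_tracks = defaultdict(list); sheet_tracks[sheet_id].append((frame_number, peptides))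
  let sheet_tracks : PySem.Dict String (List (Int × List Int)) :=
    sheet_records.foldl
      (fun d fr => fr.2.foldl (fun d p => d.modify p.1 [] (· ++ [(fr.1, p.2)])) d)
      PySem.Dict.empty
  -- sheet_lifetimes = {}; one entry per sheet with len(history) >= min_sheet_size
  let sheet_lifetimes : PySem.Dict String (List (String × Int)) :=
    sheet_tracks.items.foldl
      (fun out p =>
        if min_sheet_size ≤ (p.2.length : Int) then
          let frames := p.2.map (·.1)
          match PySem.List.min? frames (fun y => y), PySem.List.max? frames (fun y => y) with
          | some s, some e =>
              out.insert p.1 [("start_frame", s), ("end_frame", e), ("lifetime", e - s + 1)]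
          | _, _ => out   -- unreachable: a tracked history is never empty
        else out)
      PySem.Dict.empty
  sheet_lifetimes.items

-- ===== PORT B =====
def time_resolved_sheet_analysis_alt (sheet_records : List (Int × List (String × List Int))) (min_sheet_size : Int) : List (String × List (String × Int)) :=
  let aggs : PySem.Dict String (Int × Int × Int) :=
    sheet_records.foldl
      (fun d fr => fr.2.foldl
        (fun d p =>
          match d.get? p.1 with
          | some (c, lo, hi) =>
              d.insert p.1 (c + 1, if fr.1 < lo then fr.1 else lo, if hi < fr.1 then fr.1 else hi)
          | none => d.insert p.1 (1, fr.1, fr.1))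
        d)
      PySem.Dict.empty
  (aggs.items.filter (fun q => min_sheet_size ≤ q.2.1)).map
    (fun q => (q.1, [("start_frame", q.2.2.1), ("end_frame", q.2.2.2), ("lifetime", q.2.2.2 - q.2.2.1 + 1)]))

-- ===== PRECONDITION & SPEC =====
def Spec_time_resolved_sheet_analysis (sheet_records : List (Int × List (String × List Int))) (min_sheet_size : Int) (out : List (String × List (String × Int))) : Prop := out = time_resolved_sheet_analysis_alt sheet_records min_sheet_size
instance (sheet_records : List (Int × List (String × List Int))) (min_sheet_size : Int) (out : List (String × List (String × Int))) : Decidable (Spec_time_resolved_sheet_analysis sheet_records min_sheet_size out) := by unfold Spec_time_resolved_sheet_analysis; infer_instance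

-- ===== CLAIM (what is proved, stated in full; the proofs are below) =====
def Claim_equal_time_resolved_sheet_analysis : Prop := ∀ (sheet_records : List (Int × List (String × List Int))) (min_sheet_size : Int), Dom_time_resolved_sheet_analysis sheet_records min_sheet_size → Spec_time_resolved_sheet_analysis sheet_records min_sheet_size (time_resolved_sheet_analysis sheet_records min_sheet_size)

-- ===== LEMMAS AND PROOFS =====

-- B's running aggregate of a (nonempty) history list: (count, min frame, max frame).
def sumOf : List (Int × List Int) → Int × Int × Int
  | [] => (0, 0, 0)
  | (f, _) :: t =>
      t.foldl (fun a q => (a.1 + 1, if q.1 < a.2.1 then q.1 else a.2.1, if a.2.2 < q.1 then q.1 else a.2.2)) (1, f, f)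

-- Relation maintained between A's history dict and B's aggregate dict during phase 1.
def TrkRel (d : PySem.Dict String (List (Int × List Int))) (e : PySem.Dict String (Int × Int × Int)) : Prop :=
  e.items = d.items.map (fun p => (p.1, sumOf p.2)) ∧ (∀ p ∈ d.items, p.2 ≠ []) ∧ d.keys.Nodup

lemma foldl_triple (t : List (Int × List Int)) (a : Int × Int × Int) :
    t.foldl (fun a q => (a.1 + 1, if q.1 < a.2.1 then q.1 else a.2.1, if a.2.2 < q.1 then q.1 else a.2.2)) a
      = (a.1 + t.length, (t.map (·.1)).foldl min a.2.1, (t.map (·.1)).foldl max a.2.2) := by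
  induction t generalizing a with
  | nil => simp
  | cons q t ih =>
      simp only [List.foldl_cons, List.map_cons, ih]
      have h1 : (if q.1 < a.2.1 then q.1 else a.2.1) = min a.2.1 q.1 := by simp [min_def]; omega
      have h2 : (if a.2.2 < q.1 then q.1 else a.2.2) = max a.2.2 q.1 := by simp [max_def]; omega
      simp [h1, h2]; ring

lemma sumOf_components (f : Int) (v : List Int) (t : List (Int × List Int)) :
    sumOf ((f, v) :: t)
      = (((t.length + 1 : Nat) : Int), (t.map (·.1)).foldl min f, (t.map (·.1)).foldl max f) := by
  simp [sumOf, foldl_triple]; ring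

lemma sumOf_append (h : List (Int × List Int)) (hne : h ≠ []) (fr : Int) (v : List Int) :
    sumOf (h ++ [(fr, v)])
      = ((sumOf h).1 + 1, if fr < (sumOf h).2.1 then fr else (sumOf h).2.1,
         if (sumOf h).2.2 < fr then fr else (sumOf h).2.2) := by
  match h with
  | [] => exact absurd rfl hne
  | (f, v0) :: t => simp [sumOf, List.foldl_append]

lemma get?_map_val (l : List (String × List (Int × List Int))) (k : String) :
    (PySem.Dict.mk (l.map (fun p => (p.1, sumOf p.2)))).get? k
      = ((PySem.Dict.mk l).get? k).map sumOf := by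
  induction l with
  | nil => rfl
  | cons p l ih =>
      obtain ⟨s, h⟩ := p
      simp only [List.map_cons, PySem.Dict.get?_mk_cons]
      split <;> simp [ih]

lemma TrkRel_get? {d : PySem.Dict String (List (Int × List Int))} {e : PySem.Dict String (Int × Int × Int)}
    (h : TrkRel d e) (k : String) : e.get? k = (d.get? k).map sumOf := by
  have he : e = PySem.Dict.mk (d.items.map (fun p => (p.1, sumOf p.2))) := by
    cases e; cases h.1; rfl
  rw [he, get?_map_val]

lemma TrkRel_step {d : PySem.Dict String (List (Int × List Int))} {e : PySem.Dict String (Int × Int × Int)}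
    (h : TrkRel d e) (fr : Int) (p : String × List Int) :
    TrkRel (d.modify p.1 [] (· ++ [(fr, p.2)]))
        (match e.get? p.1 with
         | some (c, lo, hi) => e.insert p.1 (c + 1, if fr < lo then fr else lo, if hi < fr then fr else hi)
         | none => e.insert p.1 (1, fr, fr)) := by
  have hg := TrkRel_get? h p.1
  cases hd : d.get? p.1 with
  | none =>
      have he : e.get? p.1 = none := by rw [hg, hd]; rfl
      have hcd : d.contains p.1 = false := by rw [PySem.Dict.contains_eq_isSome_get?, hd]; rfl
      have hce : e.contains p.1 = false := by rw [PySem.Dict.contains_eq_isSome_get?, he]; rfl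
      have hmem : p.1 ∉ d.keys := fun hm => by
        simp [(PySem.Dict.contains_iff_mem_keys d p.1).2 hm] at hcd
      simp only [he]
      have hmod : d.modify p.1 [] (· ++ [(fr, p.2)]) = d.insert p.1 [(fr, p.2)] := by
        show d.insert p.1 (d.getD p.1 [] ++ [(fr, p.2)]) = _
        rw [PySem.Dict.getD_of_not_contains _ _ hcd]; rfl
      rw [hmod]
      refine ⟨?_, ?_, ?_⟩
      · rw [PySem.Dict.items_insert_of_not_contains _ _ hce,
            PySem.Dict.items_insert_of_not_contains _ _ hcd, h.1]
        simp [sumOf]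
      · intro q hq
        rw [PySem.Dict.items_insert_of_not_contains _ _ hcd] at hq
        rcases List.mem_append.1 hq with hq | hq
        · exact h.2.1 q hq
        · simp at hq; simp [hq]
      · rw [PySem.Dict.keys_insert_of_not_contains _ _ hcd]
        simpa using List.Nodup.append h.2.2 (List.nodup_singleton _) (by simpa using hmem)
  | some h0 =>
      have hne : h0 ≠ [] := h.2.1 _ (PySem.Dict.mem_items_of_get?_eq_some d hd)
      rcases hs : sumOf h0 with ⟨c, lo, hi⟩
      have he : e.get? p.1 = some (c, lo, hi) := by rw [hg, hd, Option.map_some, hs]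
      have hcd : d.contains p.1 = true := by rw [PySem.Dict.contains_eq_isSome_get?, hd]; rfl
      have hce : e.contains p.1 = true := by rw [PySem.Dict.contains_eq_isSome_get?, he]; rfl
      simp only [he]
      have hmod : d.modify p.1 [] (· ++ [(fr, p.2)]) = d.insert p.1 (h0 ++ [(fr, p.2)]) := by
        show d.insert p.1 (d.getD p.1 [] ++ [(fr, p.2)]) = _
        rw [PySem.Dict.getD_of_get?_eq_some _ _ hd]
      rw [hmod]
      refine ⟨?_, ?_, ?_⟩
      · rw [PySem.Dict.items_insert_of_contains _ _ hce,
            PySem.Dict.items_insert_of_contains _ _ hcd, h.1, List.map_map, List.map_map]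
        refine List.map_congr_left (fun q hq => ?_)
        by_cases hqp : q.1 = p.1
        · simp [Function.comp, hqp, sumOf_append h0 hne fr p.2, hs]
        · simp [Function.comp, hqp]
      · intro q hq
        rw [PySem.Dict.items_insert_of_contains _ _ hcd] at hq
        rcases List.mem_map.1 hq with ⟨r, hr, hrq⟩
        by_cases hrp : r.1 = p.1
        · simp [hrp] at hrq; simp [← hrq]
        · simp [hrp] at hrq; rw [← hrq]; exact h.2.1 r hr
      · rw [PySem.Dict.keys_insert_of_contains _ _ hcd]; exact h.2.2

lemma TrkRel_inner (fr : Int) (sheets : List (String × List Int))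
    {d : PySem.Dict String (List (Int × List Int))} {e : PySem.Dict String (Int × Int × Int)}
    (h : TrkRel d e) :
    TrkRel (sheets.foldl (fun d p => d.modify p.1 [] (· ++ [(fr, p.2)])) d)
        (sheets.foldl
          (fun d p =>
            match d.get? p.1 with
            | some (c, lo, hi) => d.insert p.1 (c + 1, if fr < lo then fr else lo, if hi < fr then fr else hi)
            | none => d.insert p.1 (1, fr, fr)) e) := by
  induction sheets generalizing d e with
  | nil => exact h
  | cons p t ih => exact ih (TrkRel_step h fr p)

lemma TrkRel_outer (records : List (Int × List (String × List Int)))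
    {d : PySem.Dict String (List (Int × List Int))} {e : PySem.Dict String (Int × Int × Int)}
    (h : TrkRel d e) :
    TrkRel (records.foldl (fun d fr => fr.2.foldl (fun d p => d.modify p.1 [] (· ++ [(fr.1, p.2)])) d) d)
        (records.foldl
          (fun d fr => fr.2.foldl
            (fun d p =>
              match d.get? p.1 with
              | some (c, lo, hi) => d.insert p.1 (c + 1, if fr.1 < lo then fr.1 else lo, if hi < fr.1 then fr.1 else hi)
              | none => d.insert p.1 (1, fr.1, fr.1)) d) e) := by
  induction records generalizing d e with
  | nil => exact h
  | cons r t ih => exact ih (TrkRel_inner r.1 r.2 h)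

lemma phase2 (m : Int) (items : List (String × List (Int × List Int)))
    (acc : PySem.Dict String (List (String × Int)))
    (hfresh : ∀ p ∈ items, acc.contains p.1 = false)
    (hnd : (items.map (·.1)).Nodup)
    (hne : ∀ p ∈ items, p.2 ≠ []) :
    (items.foldl
      (fun out p =>
        if m ≤ (p.2.length : Int) then
          let frames := p.2.map (·.1)
          match PySem.List.min? frames (fun y => y), PySem.List.max? frames (fun y => y) with
          | some s, some e =>
              out.insert p.1 [("start_frame", s), ("end_frame", e), ("lifetime", e - s + 1)]
          | _, _ => out
        else out) acc).items
      = acc.items ++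
        (((items.map (fun p => (p.1, sumOf p.2))).filter (fun q => m ≤ q.2.1)).map
          (fun q => (q.1, [("start_frame", q.2.2.1), ("end_frame", q.2.2.2), ("lifetime", q.2.2.2 - q.2.2.1 + 1)]))) := by
  induction items generalizing acc with
  | nil => simp
  | cons p rest ih =>
      obtain ⟨s, h⟩ := p
      rcases h with _ | ⟨⟨f, v0⟩, t⟩
      · exact absurd rfl (hne (s, []) (by simp))
      rw [List.foldl_cons]
      simp only [List.map_cons, List.filter_cons, sumOf_components]
      by_cases hc : m ≤ ((t.length + 1 : Nat) : Int)
      · have hcl : m ≤ ((((f, v0) :: t).length : Nat) : Int) := by simpa using hc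
        simp only [if_pos hcl, decide_eq_true_eq, if_pos hc, List.map_cons,
          PySem.List.min?_id_cons, PySem.List.max?_id_cons]
        rw [ih _ ?fresh (by simpa using hnd.of_cons) (fun q hq => hne q (by simp [hq]))]
        case fresh =>
          intro q hq
          rw [PySem.Dict.contains_insert]
          have hqs : q.1 ≠ s := by
            intro hqs
            exact (List.nodup_cons.1 hnd).1 (hqs ▸ List.mem_map.2 ⟨q, hq, rfl⟩)
          simp [hqs, hfresh q (by simp [hq])]
        rw [PySem.Dict.items_insert_of_not_contains _ _ (hfresh (s, (f, v0) :: t) (by simp))]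
        simp
      · have hcl : ¬ m ≤ ((((f, v0) :: t).length : Nat) : Int) := by simpa using hc
        simp only [if_neg hcl, decide_eq_true_eq, if_neg hc]
        exact ih _ (fun q hq => hfresh q (by simp [hq])) (by simpa using hnd.of_cons)
          (fun q hq => hne q (by simp [hq]))

-- ===== VERDICT (by name: the statement is the Claim_ definition above) =====
theorem time_resolved_sheet_analysis_spec : Claim_equal_time_resolved_sheet_analysis := by
  intro records m _
  unfold Spec_time_resolved_sheet_analysis
  simp only [time_resolved_sheet_analysis, time_resolved_sheet_analysis_alt]
  have hemp : (PySem.Dict.empty : PySem.Dict String (List (Int × List Int))).items = [] := rfl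
  have hrel := TrkRel_outer records (d := PySem.Dict.empty) (e := PySem.Dict.empty)
    ⟨rfl, by simp [hemp], PySem.Dict.nodup_keys_empty⟩
  rw [phase2 m _ _ (fun q _ => rfl) (by simpa [PySem.Dict.keys] using hrel.2.2) hrel.2.1,
      hrel.1]
  have hemp2 : (PySem.Dict.empty : PySem.Dict String (List (String × Int))).items = [] := rfl
  rw [hemp2]
  simp
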